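-- pv_equiv track=rewrite | github.com/Abhishek-s04/Practice-Problems---Level-1 | Practice Problem 31 - Level 1.py | sum_of_elements
-- ===== SOURCE A (Python) =====
-- def sum_of_elements(num_list, number):
--     result_sum = 0
--     skip_indices = []
--
--     for i in range(len(num_list)):
--         if num_list[i] == number:
--             skip_indices.append(i)
--             if i > 0:
--                 skip_indices.append(i - 1)
--             if i < len(num_list) - 1:
--                 skip_indices.append(i + 1)
--
--     for i in range(len(num_list)):
--         if i not in skip_indices:
--             result_sum += num_list[i]
--
--     return result_sum
-- ===== SOURCE B (Python) =====
-- def sum_of_elements(num_list, number):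
--     n = len(num_list)
--     return sum(num_list[i] for i in range(n)
--                if not (num_list[i] == number
--                        or (i > 0 and num_list[i - 1] == number)
--                        or (i < n - 1 and num_list[i + 1] == number)))
-- ===== Notes on version B (the rewrite author's own statement) =====
-- stated objective: simpler
-- what changed: Drops the precomputed skip-index table and the second filtering pass; a single pass tests each element's own value and its two neighbours directly.
import Mathlib
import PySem

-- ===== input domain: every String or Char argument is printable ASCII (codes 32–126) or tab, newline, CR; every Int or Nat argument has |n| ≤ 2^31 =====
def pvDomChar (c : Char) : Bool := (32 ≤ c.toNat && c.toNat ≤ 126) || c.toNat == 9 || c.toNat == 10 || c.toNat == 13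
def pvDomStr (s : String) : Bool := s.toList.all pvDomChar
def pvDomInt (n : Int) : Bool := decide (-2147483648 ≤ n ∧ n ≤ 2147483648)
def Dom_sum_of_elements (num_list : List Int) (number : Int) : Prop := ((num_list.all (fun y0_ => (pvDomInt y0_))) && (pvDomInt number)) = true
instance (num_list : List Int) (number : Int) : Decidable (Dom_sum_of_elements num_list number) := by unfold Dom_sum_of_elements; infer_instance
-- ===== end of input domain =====

-- B replaces A's precomputed skip-index table (and the 'i not in skip_indices' scan)
-- with a single pass testing each element's own value and its two neighbours directly.

-- ===== PORT A =====
def sum_of_elements (num_list : List Int) (number : Int) : Int :=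
  let n : Int := num_list.length
  let skip_indices : List Int :=
    (PySem.List.pyRange 0 n 1).foldl (fun sk i =>
      if PySem.List.pyGetD num_list i 0 = number then
        let sk := sk ++ [i]
        let sk := if 0 < i then sk ++ [i - 1] else sk
        if i < n - 1 then sk ++ [i + 1] else sk
      else sk) []
  (PySem.List.pyRange 0 n 1).foldl (fun s i =>
    if i ∉ skip_indices then s + PySem.List.pyGetD num_list i 0 else s) 0

-- ===== PORT B =====
def sum_of_elements_alt (num_list : List Int) (number : Int) : Int :=
  let n : Int := num_list.length
  (PySem.List.pyRange 0 n 1).foldl (fun s i =>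
    if ¬ (PySem.List.pyGetD num_list i 0 = number ∨
          (0 < i ∧ PySem.List.pyGetD num_list (i - 1) 0 = number) ∨
          (i < n - 1 ∧ PySem.List.pyGetD num_list (i + 1) 0 = number))
    then s + PySem.List.pyGetD num_list i 0 else s) 0

-- ===== PRECONDITION & SPEC =====
def Spec_sum_of_elements (num_list : List Int) (number : Int) (out : Int) : Prop := out = sum_of_elements_alt num_list number
instance (num_list : List Int) (number : Int) (out : Int) : Decidable (Spec_sum_of_elements num_list number out) := by unfold Spec_sum_of_elements; infer_instance

-- ===== CLAIM (what is proved, stated in full; the proofs are below) =====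
def Claim_equal_sum_of_elements : Prop := ∀ (num_list : List Int) (number : Int), Dom_sum_of_elements num_list number → Spec_sum_of_elements num_list number (sum_of_elements num_list number)

-- ===== LEMMAS AND PROOFS =====

-- the per-index contribution of A's first loop, written as a block appended at once
def pvContrib (d : Int → Int) (number n i : Int) : List Int :=
  if d i = number then
    [i] ++ (if 0 < i then [i - 1] else []) ++ (if i < n - 1 then [i + 1] else [])
  else []

-- A's skip table is the flatMap of the per-index contributions
lemma pvSkip_eq_flatMap (d : Int → Int) (number n : Int) :
    (PySem.List.pyRange 0 n 1).foldl (fun sk i =>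
      if d i = number then
        let sk := sk ++ [i]
        let sk := if 0 < i then sk ++ [i - 1] else sk
        if i < n - 1 then sk ++ [i + 1] else sk
      else sk) [] = (PySem.List.pyRange 0 n 1).flatMap (pvContrib d number n) := by
  have h1 : (PySem.List.pyRange 0 n 1).foldl (fun sk i =>
      if d i = number then
        let sk := sk ++ [i]
        let sk := if 0 < i then sk ++ [i - 1] else sk
        if i < n - 1 then sk ++ [i + 1] else sk
      else sk) [] = (PySem.List.pyRange 0 n 1).foldl
        (fun sk i => sk ++ pvContrib d number n i) [] :=
    PySem.List.foldl_congr_mem _ _ _ _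
      (by intro acc x _; simp only [pvContrib]; split_ifs <;> simp)
  rw [h1]
  simpa using PySem.List.foldl_append_eq_flatMap (pvContrib d number n) (PySem.List.pyRange 0 n 1) []

lemma mem_pvContrib (d : Int → Int) (number n j i : Int) :
    i ∈ pvContrib d number n j ↔
      d j = number ∧ (i = j ∨ (0 < j ∧ i = j - 1) ∨ (j < n - 1 ∧ i = j + 1)) := by
  unfold pvContrib
  split_ifs with h1 h2 h3 h4 <;> simp_all <;> omega

-- membership in the skip table, for an index inside the range, is B's neighbourhood test
lemma pvSkip_mem_iff (d : Int → Int) (number n i : Int) (h0 : 0 ≤ i) (h1 : i < n) :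
    (i ∈ (PySem.List.pyRange 0 n 1).flatMap (pvContrib d number n)) ↔
    (d i = number ∨ (0 < i ∧ d (i - 1) = number) ∨ (i < n - 1 ∧ d (i + 1) = number)) := by
  simp only [List.mem_flatMap, PySem.List.mem_pyRange_one, mem_pvContrib]
  constructor
  · rintro ⟨j, ⟨hj0, hjn⟩, hdj, (rfl | ⟨hjp, rfl⟩ | ⟨hjn1, rfl⟩)⟩
    · exact Or.inl hdj
    · have hji : j = (j - 1) + 1 := by omega
      refine Or.inr (Or.inr ⟨by omega, ?_⟩)
      rw [← hji]; exact hdj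
    · have hji : j = (j + 1) - 1 := by omega
      refine Or.inr (Or.inl ⟨by omega, ?_⟩)
      rw [← hji]; exact hdj
  · rintro (h | ⟨hi, h⟩ | ⟨hi, h⟩)
    · exact ⟨i, ⟨h0, h1⟩, h, Or.inl rfl⟩
    · exact ⟨i - 1, ⟨by omega, by omega⟩, h, Or.inr (Or.inr ⟨by omega, by omega⟩)⟩
    · exact ⟨i + 1, ⟨by omega, by omega⟩, h, Or.inr (Or.inl ⟨by omega, by omega⟩)⟩

-- ===== VERDICT (by name: the statement is the Claim_ definition above) =====
theorem sum_of_elements_spec : Claim_equal_sum_of_elements := by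
  intro num_list number _
  unfold Spec_sum_of_elements sum_of_elements sum_of_elements_alt
  simp only []
  rw [pvSkip_eq_flatMap (fun i => PySem.List.pyGetD num_list i 0) number (num_list.length : Int)]
  apply PySem.List.foldl_congr_mem
  intro acc i hi
  rw [PySem.List.mem_pyRange_one] at hi
  have hmem := pvSkip_mem_iff (fun k => PySem.List.pyGetD num_list k 0) number
      (num_list.length : Int) i hi.1 hi.2
  by_cases h : (PySem.List.pyGetD num_list i 0 = number ∨
      (0 < i ∧ PySem.List.pyGetD num_list (i - 1) 0 = number) ∨
      (i < (num_list.length : Int) - 1 ∧ PySem.List.pyGetD num_list (i + 1) 0 = number))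
  · rw [if_neg (not_not_intro h), if_neg (fun hc => hc (hmem.mpr h))]
  · rw [if_pos (fun hc => h (hmem.mp hc)), if_pos h]
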